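-- pv_equiv track=rewrite | github.com/izewfktvy533zjmn/study | Algorithm/vbcode.py | _createNumber
-- ===== SOURCE A (Python) =====
-- def _createNumber(n):
--     b_lst = []
--
--     while True:
--         b_lst.append(n % 128)
--
--         if n < 128:
--             break
--
--         n = n // 128
--
--     b_lst[0] += 128
--
--     return b_lst[::-1]
-- ===== SOURCE B (Python) =====
-- def _createNumber(n):
--     k = 1
--     while 128 ** k <= n:
--         k += 1
--     return [(n // 128 ** (k - 1 - i)) % 128 + (128 if i == k - 1 else 0) for i in range(k)]
-- ===== Notes on version B (the rewrite author's own statement) =====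
-- stated objective: alternative
-- what changed: Replaces A's peel-a-digit-per-iteration loop (collect n % 128, n //= 128, mark the first element, then reverse) by first counting the number k of base-128 digits and then emitting the digits MSB-first directly via positional powers (n // 128**(k-1-i)) % 128, with the continuation marker added on the last position inside the comprehension; no list reversal or in-place mutation.
import Mathlib
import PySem

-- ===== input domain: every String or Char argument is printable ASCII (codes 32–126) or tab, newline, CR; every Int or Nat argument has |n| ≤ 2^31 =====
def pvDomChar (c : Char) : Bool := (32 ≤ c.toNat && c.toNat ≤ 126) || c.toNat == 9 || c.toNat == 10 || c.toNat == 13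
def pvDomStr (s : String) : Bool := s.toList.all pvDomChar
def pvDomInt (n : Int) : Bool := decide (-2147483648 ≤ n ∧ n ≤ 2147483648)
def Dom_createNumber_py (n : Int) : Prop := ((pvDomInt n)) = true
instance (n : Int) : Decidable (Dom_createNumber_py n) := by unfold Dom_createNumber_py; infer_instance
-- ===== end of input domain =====

-- B replaces A's peel-digits-then-reverse loop by first counting the digits k and then
-- emitting the base-128 digits MSB-first by positional powers (objective: alternative decomposition).

-- ===== PORT A =====
-- the 'while True' loop: the list of successive 'n % 128' values in append order
def createNumberLoopA (n : Int) : List Int :=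
  PySem.Int.mod n 128 ::
    (if n < 128 then [] else createNumberLoopA (PySem.Int.floordiv n 128))
termination_by n.toNat
decreasing_by
  exact
    have h128 : ¬ n < 128 := ‹¬ n < 128›
    have hpos : (0:Int) < n := lt_of_lt_of_le (by decide) (Int.not_lt.mp h128)
    have hdiv : PySem.Int.floordiv n 128 = n / 128 :=
      PySem.Int.floordiv_eq_ediv_of_pos (by decide)
    hdiv ▸ (Int.toNat_lt_toNat hpos).mpr
      ((Int.ediv_lt_iff_lt_mul (by decide)).mpr (lt_mul_of_one_lt_right hpos (by decide)))

def createNumber_py (n : Int) : List Int :=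
  let b := createNumberLoopA n
  -- b_lst[0] += 128 (b_lst is nonempty by construction)
  let b' := match b with
    | [] => []
    | x :: xs => (x + 128) :: xs
  -- b_lst[::-1]  (exact: PySem.List.slice?_none_none_neg_one)
  b'.reverse

-- ===== PORT B =====
-- the 'while 128 ** k <= n: k += 1' loop (k stays a positive int; ported as Nat)
def createNumberK (n : Int) (k : Nat) : Nat :=
  if (128:Int) ^ k ≤ n then createNumberK n (k + 1) else k
termination_by (n + 1 - 128 ^ k).toNat
decreasing_by
  exact
    have hk : (128:Int) ^ k ≤ n := ‹(128:Int) ^ k ≤ n›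
    have hlt : (128:Int) ^ k < 128 ^ (k + 1) := pow_lt_pow_right₀ (by decide) (Nat.lt_succ_self k)
    have hb : (0:Int) < n + 1 - 128 ^ k := Int.sub_pos.mpr (Int.lt_add_one_iff.mpr hk)
    (Int.toNat_lt_toNat hb).mpr (Int.sub_lt_sub_left hlt (n + 1))

def createNumber_py_alt (n : Int) : List Int :=
  let k := createNumberK n 1
  (List.range k).map (fun i =>
    PySem.Int.mod (PySem.Int.floordiv n ((128:Int) ^ (k - 1 - i))) 128
      + (if i = k - 1 then 128 else 0))

-- ===== PRECONDITION & SPEC =====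
def Spec_createNumber_py (n : Int) (out : List Int) : Prop := out = createNumber_py_alt n
instance (n : Int) (out : List Int) : Decidable (Spec_createNumber_py n out) := by unfold Spec_createNumber_py; infer_instance

-- ===== CLAIM (what is proved, stated in full; the proofs are below) =====
def Claim_equal_createNumber_py : Prop := ∀ (n : Int), Dom_createNumber_py n → Spec_createNumber_py n (createNumber_py n)

-- ===== LEMMAS AND PROOFS =====

theorem floordiv128 (n : Int) : PySem.Int.floordiv n 128 = n / 128 :=
  PySem.Int.floordiv_eq_ediv_of_pos (by norm_num)

-- shifting the digit counter: one division by 128 costs exactly one digit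
theorem createNumberK_shift (μ : Nat) : ∀ (n : Int) (j : Nat), 128 ≤ n →
    (n + 1 - 128 ^ (j+1)).toNat ≤ μ →
    createNumberK n (j + 1) = createNumberK (n / 128) j + 1 := by
  induction μ with
  | zero =>
    intro n j hn hμ
    have h1 : (1:Int) ≤ 128 ^ (j+1) := one_le_pow₀ (by norm_num)
    conv_lhs => rw [createNumberK]
    conv_rhs => rw [createNumberK]
    have hiff : ((128:Int) ^ (j+1) ≤ n) ↔ ((128:Int) ^ j ≤ n / 128) := by
      rw [Int.le_ediv_iff_mul_le (by norm_num : (0:Int) < 128), ← pow_succ]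
    by_cases h : (128:Int) ^ (j+1) ≤ n
    · exfalso; omega
    · rw [if_neg h, if_neg (by rw [← hiff]; exact h)]
  | succ μ ih =>
    intro n j hn hμ
    conv_lhs => rw [createNumberK]
    conv_rhs => rw [createNumberK]
    have hiff : ((128:Int) ^ (j+1) ≤ n) ↔ ((128:Int) ^ j ≤ n / 128) := by
      rw [Int.le_ediv_iff_mul_le (by norm_num : (0:Int) < 128), ← pow_succ]
    by_cases h : (128:Int) ^ (j+1) ≤ n
    · rw [if_pos h, if_pos (hiff.mp h)]
      apply ih n (j+1) hn
      have h1 : (1:Int) ≤ 128 ^ (j+1) := one_le_pow₀ (by norm_num)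
      have h2 : (128:Int) ^ (j+1+1) = 128 ^ (j+1) * 128 := pow_succ _ _
      omega
    · rw [if_neg h, if_neg (by rw [← hiff]; exact h)]

theorem createNumberK_base (n : Int) (h : n < 128) : createNumberK n 1 = 1 := by
  rw [createNumberK, if_neg (by simpa using not_le.mpr h)]

theorem createNumberK_step (n : Int) (h : 128 ≤ n) :
    createNumberK n 1 = createNumberK (n / 128) 1 + 1 := by
  have h0 : createNumberK n 1 = createNumberK (n / 128) 0 + 1 := by
    have := createNumberK_shift (n + 1 - 128 ^ 1).toNat n 0 h (by norm_num)
    simpa using this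
  have hm : (1:Int) ≤ n / 128 := by
    rw [Int.le_ediv_iff_mul_le (by norm_num : (0:Int) < 128)]; omega
  rw [h0]
  conv_lhs => rw [createNumberK]
  rw [if_pos (show (128:Int) ^ 0 ≤ n / 128 by rw [pow_zero]; exact hm)]

-- the unmarked digit list: A's loop, reversed, is B's positional map without the +128 marker
theorem createNumber_core (μ : Nat) : ∀ (n : Int), n.toNat ≤ μ →
    (createNumberLoopA n).reverse =
      (List.range (createNumberK n 1)).map
        (fun i => PySem.Int.mod (n / 128 ^ (createNumberK n 1 - 1 - i)) 128) := by
  induction μ with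
  | zero =>
    intro n hμ
    have hn : n < 128 := by omega
    rw [createNumberLoopA, if_pos hn, createNumberK_base n hn]
    simp
  | succ μ ih =>
    intro n hμ
    by_cases hn : n < 128
    · rw [createNumberLoopA, if_pos hn, createNumberK_base n hn]
      simp
    · rw [not_lt] at hn
      set m := n / 128 with hm
      have hmlt : m.toNat ≤ μ := by
        have : m = n / 128 := hm
        omega
      have IH := ih m hmlt
      set K := createNumberK m 1 with hK
      rw [createNumberLoopA, if_neg (by omega), floordiv128, ← hm,
        createNumberK_step n hn, ← hm, ← hK, List.range_succ, List.map_append,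
        List.reverse_cons]
      congr 1
      · -- shifted digits of m are the high digits of n
        rw [IH]
        apply List.map_congr_left
        intro i hi
        rw [List.mem_range] at hi
        have hexp : K + 1 - 1 - i = (K - 1 - i) + 1 := by omega
        rw [hexp, pow_succ, mul_comm, ← Int.ediv_ediv_of_nonneg (by norm_num : (0:Int) ≤ 128), ← hm]
      · -- the last digit is n % 128
        simp

theorem createNumberK_pos (n : Int) : 1 ≤ createNumberK n 1 := by
  by_cases h : n < 128
  · rw [createNumberK_base n h]
  · rw [createNumberK_step n (by omega)]; omega

-- ===== VERDICT (by name: the statement is the Claim_ definition above) =====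
theorem createNumber_py_spec : Claim_equal_createNumber_py := by
  intro n _
  unfold Spec_createNumber_py createNumber_py createNumber_py_alt
  set k := createNumberK n 1 with hk
  set g := fun i => PySem.Int.mod (n / 128 ^ (k - 1 - i)) 128 with hg
  have hcore := createNumber_core n.toNat n le_rfl
  rw [← hk, ← hg] at hcore
  have hk1 : 1 ≤ k := createNumberK_pos n
  obtain ⟨K, hK⟩ : ∃ K, k = K + 1 := ⟨k - 1, by omega⟩
  -- decompose the reversed loop list using the core lemma
  have hsplit : (createNumberLoopA n).reverse = (List.range K).map g ++ [g K] := by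
    rw [hcore, hK, List.range_succ, List.map_append, List.map_cons, List.map_nil]
  obtain ⟨x, xs, hcons⟩ : ∃ x xs, createNumberLoopA n = x :: xs := by
    rw [createNumberLoopA]; exact ⟨_, _, rfl⟩
  have hrev : xs.reverse ++ [x] = (List.range K).map g ++ [g K] := by
    rw [← hsplit, hcons]; simp
  have hparts : xs.reverse = (List.range K).map g ∧ [x] = [g K] :=
    List.append_inj' hrev rfl
  simp only [hcons]
  rw [List.reverse_cons, hparts.1, hK, List.range_succ, List.map_append,
    List.map_cons, List.map_nil]
  congr 1
  · apply List.map_congr_left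
    intro i hi
    rw [List.mem_range] at hi
    rw [if_neg (by omega)]
    simp only [hg, add_zero]
    rw [PySem.Int.floordiv_eq_ediv_of_pos (pow_pos (by norm_num) _)]
    rw [show K + 1 - 1 - i = k - 1 - i by omega]
  · have hx : x = g K := by simpa using hparts.2
    rw [if_pos (by omega), hx]
    simp only [hg]
    rw [PySem.Int.floordiv_eq_ediv_of_pos (pow_pos (by norm_num) _)]
    rw [show k - 1 - K = 0 by omega, show K + 1 - 1 - K = 0 by omega, pow_zero, Int.ediv_one]
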